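-- pv_equiv track=rewrite | github.com/SandhyaArja/python-files1 | strings.py | alternative_words2
-- ===== SOURCE A (Python) =====
-- def alternative_words2(word):
--     result = ""
--     for i in range(len(word)):
--         if i % 3 == 0:
--             result += word[i].upper()
--         else:
--             result += word[i].lower()
--     return result
-- ===== SOURCE B (Python) =====
-- def alternative_words2(word):
--     parts = []
--     for i in range(0, len(word), 3):
--         chunk = word[i:i+3]
--         parts.append(chunk[0].upper() + chunk[1:].lower())
--     return "".join(parts)
-- ===== Notes on version B (the rewrite author's own statement) =====
-- stated objective: alternative
-- what changed: Replaces the per-index modulo branch over every character with a group-wise traversal: the word is cut into chunks of three, each chunk becomes first-char-uppercased plus rest-lowercased, and the pieces are joined once.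
import Mathlib
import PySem

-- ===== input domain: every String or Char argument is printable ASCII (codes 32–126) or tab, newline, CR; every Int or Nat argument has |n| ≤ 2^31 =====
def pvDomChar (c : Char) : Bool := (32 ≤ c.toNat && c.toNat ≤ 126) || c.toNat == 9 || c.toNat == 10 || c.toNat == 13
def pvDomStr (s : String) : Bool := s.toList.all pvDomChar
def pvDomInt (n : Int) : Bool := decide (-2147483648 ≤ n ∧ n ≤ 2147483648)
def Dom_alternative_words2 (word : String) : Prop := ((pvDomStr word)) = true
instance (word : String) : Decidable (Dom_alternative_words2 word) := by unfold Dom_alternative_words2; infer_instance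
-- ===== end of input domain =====

-- B iterates over the word in chunks of three (first char uppercased, rest lowercased, joined once)
-- instead of A's per-index modulo branch; objective: alternative decomposition, same cost.

-- ===== PORT A =====
-- result = ""; for i in range(len(word)): if i % 3 == 0: result += word[i].upper() else: result += word[i].lower()
def alternative_words2 (word : String) : String :=
  String.mk ((PySem.List.pyRange 0 (PySem.Str.len word) 1).foldl
    (fun acc i =>
      if PySem.Int.mod i 3 == 0 then
        acc ++ [PySem.Chars.upperChar (PySem.List.pyGetD word.toList i ' ')]
      else
        acc ++ [PySem.Chars.lowerChar (PySem.List.pyGetD word.toList i ' ')])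
    [])

-- ===== PORT B =====
-- for i in range(0, len(word), 3): chunk = word[i:i+3]; parts.append(chunk[0].upper() + chunk[1:].lower())
-- rendered as structural recursion peeling one 3-chunk (head, then up to two more chars) per step
def alternative_words2Chunks : List Char → List Char
  | [] => []
  | c :: rest =>
      (PySem.Chars.upperChar c :: PySem.Chars.lower (rest.take 2))
        ++ alternative_words2Chunks (rest.drop 2)
termination_by l => l.length
decreasing_by simp

def alternative_words2_alt (word : String) : String :=
  String.mk (alternative_words2Chunks word.toList)

-- ===== PRECONDITION & SPEC =====
def Spec_alternative_words2 (word : String) (out : String) : Prop := out = alternative_words2_alt word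
instance (word : String) (out : String) : Decidable (Spec_alternative_words2 word out) := by unfold Spec_alternative_words2; infer_instance

-- ===== CLAIM (what is proved, stated in full; the proofs are below) =====
def Claim_equal_alternative_words2 : Prop := ∀ (word : String), Dom_alternative_words2 word → Spec_alternative_words2 word (alternative_words2 word)

-- ===== LEMMAS AND PROOFS =====

-- pointwise rule both programs implement, as a function of the index
def pvRule (l : List Char) (k : Nat) (h : k < l.length) : Char :=
  if k % 3 == 0 then PySem.Chars.upperChar l[k] else PySem.Chars.lowerChar l[k]

theorem chunks_length (l : List Char) :
    (alternative_words2Chunks l).length = l.length := by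
  fun_induction alternative_words2Chunks l with
  | case1 => simp
  | case2 c rest ih =>
      simp [PySem.Chars.lower, ih]
      omega

theorem chunks_cons (c : Char) (rest : List Char) :
    alternative_words2Chunks (c :: rest)
      = (PySem.Chars.upperChar c :: PySem.Chars.lower (rest.take 2))
        ++ alternative_words2Chunks (rest.drop 2) := by
  rw [alternative_words2Chunks]

theorem chunks_getElem (l : List Char) (k : Nat) (h : k < l.length) :
    (alternative_words2Chunks l)[k]'(by rw [chunks_length]; exact h) = pvRule l k h := by
  fun_induction alternative_words2Chunks l generalizing k with
  | case1 => simp at h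
  | case2 c rest ih =>
      match k with
      | 0 => simp [chunks_cons, pvRule]
      | 1 =>
          have hr : 1 ≤ rest.length := by simp at h; omega
          simp [chunks_cons, pvRule, PySem.Chars.lower, List.getElem_append]
          rw [dif_pos (by omega : 0 < rest.length)]
      | 2 =>
          have hr : 2 ≤ rest.length := by simp at h; omega
          simp [chunks_cons, pvRule, PySem.Chars.lower, List.getElem_append]
          rw [dif_pos (by omega : 1 < rest.length)]
      | (k+3) =>
          have hr : k + 3 ≤ rest.length := by simp at h; omega
          have hmin : (rest.take 2).length = 2 := by simp; omega
          have hk : k < (rest.drop 2).length := by simp; omega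
          have hlow : (PySem.Chars.lower (rest.take 2)).length = 2 := by
            simp [PySem.Chars.lower]; omega
          simp only [chunks_cons, List.cons_append, List.getElem_cons_succ,
            List.getElem_append, hlow]
          rw [dif_neg (by omega)]
          have := ih k hk
          simp only [show k + 2 - 2 = k from by omega, this]
          simp [pvRule, Nat.add_mod_right, List.getElem_drop,
            show 2 + k = k + 2 from by omega]

theorem aChars_eq (l : List Char) :
    ((PySem.List.pyRange 0 (l.length : Int) 1).foldl
      (fun acc i =>
        if PySem.Int.mod i 3 == 0 then
          acc ++ [PySem.Chars.upperChar (PySem.List.pyGetD l i ' ')]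
        else
          acc ++ [PySem.Chars.lowerChar (PySem.List.pyGetD l i ' ')]) [])
    = alternative_words2Chunks l := by
  have hbody : (fun (acc : List Char) i =>
      if PySem.Int.mod i 3 == 0 then
        acc ++ [PySem.Chars.upperChar (PySem.List.pyGetD l i ' ')]
      else acc ++ [PySem.Chars.lowerChar (PySem.List.pyGetD l i ' ')])
      = (fun acc i => acc ++ [if PySem.Int.mod i 3 == 0 then
          PySem.Chars.upperChar (PySem.List.pyGetD l i ' ')
        else PySem.Chars.lowerChar (PySem.List.pyGetD l i ' ')]) := by
    funext acc i; split <;> rfl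
  rw [hbody]
  rw [PySem.List.foldl_append_singleton_eq_map]
  have hlen : ((0:Int) + l.length - 0).toNat = l.length := by omega
  apply List.ext_getElem
  · simp [PySem.List.length_pyRange_one, chunks_length]
  · intro k h1 h2
    have hk : k < l.length := by
      simpa [PySem.List.length_pyRange_one] using h1
    rw [chunks_getElem l k hk]
    simp only [List.nil_append, List.getElem_map, PySem.List.getElem_pyRange_one]
    have hmod : PySem.Int.mod ((0:Int) + k) 3 = ((k % 3 : Nat) : Int) := by
      simp [PySem.Int.mod]
      rw [Int.fmod_eq_emod]
      omega
    have hget : PySem.List.pyGetD l ((0:Int) + k) ' ' = l[k] := by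
      have : ((0:Int) + k) = ((k : Nat) : Int) := by omega
      rw [this, PySem.List.pyGetD_natCast]
      simp [List.getD_eq_getElem?_getD, hk]
    rw [hmod, hget]
    by_cases hd : k % 3 = 0
    · simp [pvRule, hd]
    · simp [pvRule, hd]
      intro hdd
      exfalso
      omega

-- ===== VERDICT (by name: the statement is the Claim_ definition above) =====
theorem alternative_words2_spec : Claim_equal_alternative_words2 := by
  intro word _
  unfold Spec_alternative_words2 alternative_words2 alternative_words2_alt
  have h := aChars_eq word.toList
  simp only [PySem.Str.len_eq] at *
  rw [h]
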